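-- pv_equiv track=rewrite | github.com/employer1/projet-snake | trier_acronyme_informatique.py | verifier_doublons
-- ===== SOURCE A (Python) =====
-- def extraire_reponse_texte(entree: dict[str, object]) -> str | None:
--     reponse = entree.get("reponse")
--     if reponse is None:
--         return None
--
--     valeurs = reponse if isinstance(reponse, list) else [reponse]
--
--     for valeur in valeurs:
--         texte = str(valeur).strip()
--         if texte:
--             return texte
--
--     return None
--
-- def normaliser_reponse(entree: object) -> str | None:
--     if not isinstance(entree, dict):
--         return None
--
--     texte_reponse = extraire_reponse_texte(entree)
--     if texte_reponse is None:
--         return None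
--
--     return texte_reponse.casefold()
--
-- def verifier_doublons(questionnaire: list[object]) -> list[str]:
--     frequences: dict[str, int] = {}
--     libelles: dict[str, str] = {}
--
--     for entree in questionnaire:
--         cle = normaliser_reponse(entree)
--         if cle is None:
--             continue
--
--         frequences[cle] = frequences.get(cle, 0) + 1
--         libelles.setdefault(cle, extraire_reponse_texte(entree) or "")
--
--     return sorted(
--         libelles[cle] for cle, count in frequences.items() if count > 1
--     )
-- ===== SOURCE B (Python) =====
-- def _premier_texte(entree):
--     if not isinstance(entree, dict):
--         return None
--     reponse = entree.get("reponse")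
--     if reponse is None:
--         return None
--     valeurs = reponse if isinstance(reponse, list) else [reponse]
--     return next((texte for texte in (str(v).strip() for v in valeurs) if texte), None)
--
--
-- def verifier_doublons(questionnaire):
--     paires = []
--     for entree in questionnaire:
--         texte = _premier_texte(entree)
--         if texte is not None:
--             paires.append((texte.casefold(), texte))
--     # stable sort by key: equal keys stay in first-seen order, so the head of
--     # each run is the label of the earliest occurrence of that key
--     paires.sort(key=lambda p: p[0])
--     resultat = []
--     i = 0
--     n = len(paires)
--     while i < n:
--         j = i + 1
--         while j < n and paires[j][0] == paires[i][0]: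
--             j += 1
--         if j - i > 1:
--             resultat.append(paires[i][1])
--         i = j
--     return sorted(resultat)
-- ===== Notes on version B (the rewrite author's own statement) =====
-- stated objective: alternative
-- what changed: Replaces A's single hash-dict pass (frequency counter plus setdefault label dict) by a staged sort-then-scan: build (casefolded key, label) pairs, stable-sort them by key, sweep consecutive equal-key runs taking the head label of each run longer than one, then sort the labels.
import Mathlib
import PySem

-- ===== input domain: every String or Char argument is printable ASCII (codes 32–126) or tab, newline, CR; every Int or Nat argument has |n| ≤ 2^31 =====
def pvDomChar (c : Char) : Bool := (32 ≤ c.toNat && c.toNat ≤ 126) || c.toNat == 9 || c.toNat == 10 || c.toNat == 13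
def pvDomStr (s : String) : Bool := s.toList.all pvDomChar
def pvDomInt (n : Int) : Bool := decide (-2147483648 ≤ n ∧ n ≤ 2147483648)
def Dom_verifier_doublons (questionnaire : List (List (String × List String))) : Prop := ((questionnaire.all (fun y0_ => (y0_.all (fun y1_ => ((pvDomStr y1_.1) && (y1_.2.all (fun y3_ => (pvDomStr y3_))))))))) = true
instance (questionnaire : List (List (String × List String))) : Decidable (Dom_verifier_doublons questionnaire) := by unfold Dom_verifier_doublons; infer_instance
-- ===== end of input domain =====

-- B replaces A's two hash dicts by a staged sort-then-scan over (key,label) pairs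
-- (stable sort by key, then a sweep of consecutive equal-key runs): an alternative,
-- dict-free formulation (not faster).


-- ===== PORT A =====
-- inner 'for valeur in valeurs' loop of extraire_reponse_texte (str(valeur) is the identity
-- on str; 'if texte:' is the non-emptiness test)
def pvExtrLoop : List String → Option String
  | [] => none
  | valeur :: rest =>
    let texte := PySem.Str.strip valeur
    if texte ≠ "" then some texte else pvExtrLoop rest

-- entree.get("reponse"); on this typed domain the value is always a list and never None,
-- so 'valeurs = reponse if isinstance(reponse, list) else [reponse]' is the identity
def extraire_reponse_texte (entree : List (String × List String)) : Option String :=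
  match (PySem.Dict.mk entree).get? "reponse" with
  | none => none
  | some valeurs => pvExtrLoop valeurs

-- isinstance(entree, dict) is always true on this typed domain; casefold = lower on ASCII
def normaliser_reponse (entree : List (String × List String)) : Option String :=
  match extraire_reponse_texte entree with
  | none => none
  | some texte_reponse => some (PySem.Str.lower texte_reponse)

-- libelles[cle] in the comprehension: the key is always present (frequences and libelles are
-- updated together), so the lookup is total and getD's default is never used
def verifier_doublons (questionnaire : List (List (String × List String))) : List String :=
  let st := questionnaire.foldl
    (fun (st : PySem.Dict String Int × PySem.Dict String String) entree =>
      match normaliser_reponse entree with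
      | none => st
      | some cle =>
        (st.1.insert cle (st.1.getD cle 0 + 1),
         st.2.setdefault cle ((extraire_reponse_texte entree).getD "")))
    (PySem.Dict.empty, PySem.Dict.empty)
  PySem.List.sorted
    (st.1.items.filterMap (fun p => if p.2 > 1 then some (st.2.getD p.1 "") else none))
    (fun x => x) false

-- ===== PORT B =====
-- next((texte for texte in (str(v).strip() for v in valeurs) if texte), None):
-- first truthy element of the mapped generator = find? over the stripped list
def premier_texte (entree : List (String × List String)) : Option String :=
  match (PySem.Dict.mk entree).get? "reponse" with
  | none => none
  | some valeurs => (valeurs.map PySem.Str.strip).find? (fun texte => texte ≠ "")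

-- the two nested while loops of Source B: the inner 'while j < n and paires[j][0] == paires[i][0]'
-- span is the takeWhile run after position i; 'i = j' continues after it (the dropWhile rest);
-- 'if j - i > 1' is 'the run after the head is non-empty'
def pvRuns : List (String × String) → List String
  | [] => []
  | p :: rest =>
    if 0 < (rest.takeWhile (fun q => q.1 == p.1)).length
    then p.2 :: pvRuns (rest.dropWhile (fun q => q.1 == p.1))
    else pvRuns (rest.dropWhile (fun q => q.1 == p.1))
termination_by l => l.length
decreasing_by all_goals exact Nat.lt_succ_of_le (List.length_dropWhile_le _ _)

-- casefold = lower on ASCII; paires.sort(key=lambda p: p[0]) is the stable sort by first component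
def verifier_doublons_alt (questionnaire : List (List (String × List String))) : List String :=
  let paires := questionnaire.foldl
    (fun acc entree =>
      match premier_texte entree with
      | none => acc
      | some texte => acc ++ [(PySem.Str.lower texte, texte)]) []
  let tri := PySem.List.sorted paires (fun p => p.1) false
  PySem.List.sorted (pvRuns tri) (fun x => x) false

-- ===== PRECONDITION & SPEC =====
def Spec_verifier_doublons (questionnaire : List (List (String × List String))) (out : List String) : Prop := out = verifier_doublons_alt questionnaire
instance (questionnaire : List (List (String × List String))) (out : List String) : Decidable (Spec_verifier_doublons questionnaire out) := by unfold Spec_verifier_doublons; infer_instance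

-- ===== CLAIM (what is proved, stated in full; the proofs are below) =====
def Claim_equal_verifier_doublons : Prop := ∀ (questionnaire : List (List (String × List String))), Dom_verifier_doublons questionnaire → Spec_verifier_doublons questionnaire (verifier_doublons questionnaire)

-- ===== LEMMAS AND PROOFS =====

-- the (key, label) pair each questionnaire entry contributes (if any)
def pvPairOf (entree : List (String × List String)) : Option (String × String) :=
  (premier_texte entree).map (fun t => (PySem.Str.lower t, t))

-- the labels selected from pair list P for the keys ks: first label of each key occurring > 1 times
def pvSel (P : List (String × String)) (ks : List String) : List String :=
  ks.filterMap (fun k =>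
    if 1 < (P.map (fun p => p.1)).count k
    then (P.find? (fun p => p.1 == k)).map (fun p => p.2) else none)

-- the distinct keys of a (sorted) pair list, one per consecutive run
def pvKeys : List (String × String) → List String
  | [] => []
  | p :: rest => p.1 :: pvKeys (rest.dropWhile (fun q => q.1 == p.1))
termination_by l => l.length
decreasing_by all_goals exact Nat.lt_succ_of_le (List.length_dropWhile_le _ _)

lemma pvLoop_eq : ∀ vs, pvExtrLoop vs = (vs.map PySem.Str.strip).find? (fun texte => texte ≠ "") := by
  intro vs; induction vs with
  | nil => rfl
  | cons v rest ih =>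
    by_cases h : PySem.Str.strip v ≠ ""
    · rw [List.map_cons, List.find?_cons_of_pos (by simp [h])]
      simp [pvExtrLoop, h]
    · rw [List.map_cons, List.find?_cons_of_neg (by simp [h])]
      simp [pvExtrLoop, h, ih]

lemma pvExtr_eq : ∀ e, extraire_reponse_texte e = premier_texte e := by
  intro e
  simp [extraire_reponse_texte, premier_texte, pvLoop_eq]

lemma pvBPairs : ∀ (q : List (List (String × List String))) acc,
    q.foldl (fun acc entree =>
      match premier_texte entree with
      | none => acc
      | some texte => acc ++ [(PySem.Str.lower texte, texte)]) acc
    = acc ++ q.filterMap pvPairOf := by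
  intro q; induction q with
  | nil => intro acc; simp
  | cons e q ih =>
    intro acc
    cases h : premier_texte e with
    | none => simp [List.foldl_cons, h, ih, pvPairOf]
    | some t => simp [List.foldl_cons, h, ih, pvPairOf]

lemma pvASplit : ∀ (q : List (List (String × List String)))
    (d1 : PySem.Dict String Int) (d2 : PySem.Dict String String),
    q.foldl (fun (st : PySem.Dict String Int × PySem.Dict String String) entree =>
      match normaliser_reponse entree with
      | none => st
      | some cle =>
        (st.1.insert cle (st.1.getD cle 0 + 1),
         st.2.setdefault cle ((extraire_reponse_texte entree).getD ""))) (d1, d2)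
    = (((q.filterMap pvPairOf).map (fun p => p.1)).foldl (fun d k => d.insert k (d.getD k 0 + 1)) d1,
       (q.filterMap pvPairOf).foldl (fun d p => d.setdefault p.1 p.2) d2) := by
  intro q; induction q with
  | nil => intro d1 d2; simp
  | cons e q ih =>
    intro d1 d2
    cases h : premier_texte e with
    | none =>
      have hn : normaliser_reponse e = none := by
        simp [normaliser_reponse, pvExtr_eq, h]
      simp [List.foldl_cons, hn, ih, pvPairOf, h]
    | some t =>
      have hn : normaliser_reponse e = some (PySem.Str.lower t) := by
        simp [normaliser_reponse, pvExtr_eq, h]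
      have he : extraire_reponse_texte e = some t := by rw [pvExtr_eq, h]
      rw [List.foldl_cons]
      simp only [hn, he, Option.getD_some]
      rw [ih]
      simp [pvPairOf, h]

lemma pvSetdfGet : ∀ (l : List (String × String)) (d : PySem.Dict String String) (k : String),
    (l.foldl (fun d p => d.setdefault p.1 p.2) d).get? k
    = (d.get? k).or ((l.find? (fun p => p.1 == k)).map (fun p => p.2)) := by
  intro l; induction l with
  | nil => intro d k; simp
  | cons a rest ih =>
    intro d k
    rw [List.foldl_cons, ih]
    by_cases hk : a.1 = k
    · subst hk
      rw [PySem.Dict.get?_setdefault_self, List.find?_cons_of_pos (by simp)]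
      cases h : d.get? a.1 with
      | none => simp
      | some v => simp
    · rw [PySem.Dict.get?_setdefault_of_ne _ _ (fun hh => hk hh.symm),
        List.find?_cons_of_neg (by simp [hk])]

-- find? is the head of the filtered list
lemma pvFind?_eq_head?_filter {α : Type} (p : α → Bool) :
    ∀ l : List α, l.find? p = (l.filter p).head? := by
  intro l; induction l with
  | nil => rfl
  | cons a t ih =>
    cases h : p a with
    | true => rw [List.find?_cons_of_pos h, List.filter_cons_of_pos h, List.head?_cons]
    | false => rw [List.find?_cons_of_neg (by simp [h]), List.filter_cons_of_neg (by simp [h]), ih]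

-- stable insertion preserves the per-key sublists of an ordered accumulator
lemma pvInsertBy_filter (x : String × String) (k : String) :
    ∀ acc : List (String × String), acc.Pairwise (fun a b => a.1 ≤ b.1) →
    (PySem.List.insertBy (fun a b => decide (a.1 < b.1)) x acc).filter (fun q => q.1 == k)
    = acc.filter (fun q => q.1 == k) ++ (if x.1 == k then [x] else []) := by
  intro acc; induction acc with
  | nil =>
    intro _
    simp only [PySem.List.insertBy, List.filter_nil, List.nil_append]
    by_cases h : x.1 = k <;> simp [h]
  | cons y ys ih =>
    intro hp
    rw [List.pairwise_cons] at hp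
    by_cases hlt : x.1 < y.1
    · rw [show PySem.List.insertBy (fun a b => decide (a.1 < b.1)) x (y :: ys)
          = x :: y :: ys by simp [PySem.List.insertBy, hlt]]
      by_cases hx : x.1 = k
      · have hemp : (y :: ys).filter (fun q => q.1 == k) = [] := by
          rw [List.filter_eq_nil_iff]
          intro q hq
          have : y.1 ≤ q.1 := by
            rcases List.mem_cons.mp hq with h | h
            · exact h ▸ le_refl _
            · exact hp.1 q h
          have : k < q.1 := lt_of_lt_of_le (hx ▸ hlt) this
          simp [ne_of_gt this]
        rw [List.filter_cons_of_pos (by simp [hx]), hemp]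
        simp [hx]
      · rw [List.filter_cons_of_neg (by simp [hx])]
        simp [hx]
    · rw [show PySem.List.insertBy (fun a b => decide (a.1 < b.1)) x (y :: ys)
          = y :: PySem.List.insertBy (fun a b => decide (a.1 < b.1)) x ys by
            simp [PySem.List.insertBy, hlt]]
      by_cases hy : y.1 = k
      · rw [List.filter_cons_of_pos (by simp [hy]), List.filter_cons_of_pos (by simp [hy]),
          ih hp.2]
        simp
      · rw [List.filter_cons_of_neg (by simp [hy]), List.filter_cons_of_neg (by simp [hy]),
          ih hp.2]

-- stability of the sort: the sublist of pairs with a given key is unchanged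
lemma pvSorted_filter (P : List (String × String)) (k : String) :
    (PySem.List.sorted P (fun p => p.1) false).filter (fun q => q.1 == k)
    = P.filter (fun q => q.1 == k) := by
  induction P using List.reverseRecOn with
  | nil => rfl
  | append_singleton l x ih =>
    have hs : PySem.List.sorted (l ++ [x]) (fun p => p.1) false
        = PySem.List.insertBy (fun a b => decide (a.1 < b.1)) x
            (PySem.List.sorted l (fun p => p.1) false) := by
      rw [PySem.List.sorted_eq_foldl_insertBy, PySem.List.sorted_eq_foldl_insertBy,
        List.foldl_append, List.foldl_cons, List.foldl_nil]
    rw [hs, pvInsertBy_filter x k _ (PySem.List.sorted_pairwise l (fun p => p.1)),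
      ih, List.filter_append]
    by_cases h : x.1 = k <;> simp [h]

-- pvSel only looks at P through per-key counts and first matches, both preserved by the stable sort
lemma pvSel_sorted (P : List (String × String)) (ks : List String) :
    pvSel (PySem.List.sorted P (fun p => p.1) false) ks = pvSel P ks := by
  unfold pvSel
  apply List.filterMap_congr
  intro k _
  have hc : ((PySem.List.sorted P (fun p => p.1) false).map (fun p => p.1)).count k
      = (P.map (fun p => p.1)).count k :=
    ((PySem.List.sorted_perm P (fun p => p.1) false).map (fun p => p.1)).count_eq k
  have hf : (PySem.List.sorted P (fun p => p.1) false).find? (fun p => p.1 == k)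
      = P.find? (fun p => p.1 == k) := by
    rw [pvFind?_eq_head?_filter, pvFind?_eq_head?_filter, pvSorted_filter]
  rw [hc, hf]

-- every key produced by the run sweep is a key of the list
lemma pvKeys_subset_keys : ∀ S : List (String × String), ∀ k ∈ pvKeys S, k ∈ S.map (fun q => q.1) := by
  intro S
  induction S using pvKeys.induct with
  | case1 => intro k hk; simp [pvKeys] at hk
  | case2 p rest ih =>
    intro k hk
    rw [pvKeys] at hk
    rcases List.mem_cons.mp hk with hk | hk
    · simp [hk]
    · have := ih k hk
      have hsub : (rest.dropWhile (fun q => q.1 == p.1)).map (fun q => q.1) |>.Sublist (rest.map (fun q => q.1)) :=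
        (List.dropWhile_sublist _).map _
      exact List.mem_cons_of_mem _ (hsub.mem this)

lemma pvKeys_mem_iff : ∀ S : List (String × String), S.Pairwise (fun a b => a.1 ≤ b.1) →
    ∀ k, k ∈ pvKeys S ↔ k ∈ S.map (fun q => q.1) := by
  intro S
  induction S using pvKeys.induct with
  | case1 => intro _ k; simp [pvKeys]
  | case2 p rest ih =>
    intro hp k
    rw [List.pairwise_cons] at hp
    have hpw' : (rest.dropWhile (fun q => q.1 == p.1)).Pairwise (fun a b => a.1 ≤ b.1) :=
      hp.2.sublist (List.dropWhile_sublist _)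
    constructor
    · exact fun hk => pvKeys_subset_keys _ k hk
    · intro hk
      rw [pvKeys]
      rcases List.mem_cons.mp hk with hk | hk
      · simp [hk]
      · obtain ⟨q, hq, rfl⟩ := List.mem_map.mp hk
        conv at hq => rw [← List.takeWhile_append_dropWhile (p := fun q => q.1 == p.1) (l := rest)]
        rcases List.mem_append.mp hq with hq | hq
        · have hqp : q.1 = p.1 := by simpa using List.mem_takeWhile_imp hq
          simp [hqp]
        · exact List.mem_cons_of_mem _ ((ih hpw' q.1).mpr (List.mem_map_of_mem hq))

lemma pvKeys_nodup : ∀ S : List (String × String), S.Pairwise (fun a b => a.1 ≤ b.1) →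
    (pvKeys S).Nodup := by
  intro S
  induction S using pvKeys.induct with
  | case1 => intro _; simp [pvKeys]
  | case2 p rest ih =>
    intro hp
    rw [List.pairwise_cons] at hp
    have hpw' : (rest.dropWhile (fun q => q.1 == p.1)).Pairwise (fun a b => a.1 ≤ b.1) :=
      hp.2.sublist (List.dropWhile_sublist _)
    rw [pvKeys, List.nodup_cons]
    refine ⟨fun hmem => ?_, ih hpw'⟩
    have hk := pvKeys_subset_keys _ _ hmem
    obtain ⟨q, hq, hqe⟩ := List.mem_map.mp hk
    -- q is in the dropWhile rest, so its key is ≠ p.1 yet equals p.1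
    have hqrest : q ∈ rest := (List.dropWhile_sublist _).mem hq
    have hle : p.1 ≤ q.1 := hp.1 q hqrest
    -- the head of the dropWhile fails the predicate and is ≤ q, so p.1 < q.1
    cases h : rest.dropWhile (fun q => q.1 == p.1) with
    | nil => rw [h] at hq; simp at hq
    | cons h0 t =>
      have hh0 : ¬ (h0.1 == p.1) = true := by
        have := List.head?_dropWhile_not (fun q => q.1 == p.1) rest
        rw [h] at this
        simpa using this
      have hle0 : p.1 ≤ h0.1 := hp.1 h0 ((List.dropWhile_sublist _).mem (h ▸ List.mem_cons_self))
      have hlt0 : p.1 < h0.1 := lt_of_le_of_ne hle0 (fun hh => hh0 (by simp [hh.symm]))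
      rw [h] at hq
      rcases List.mem_cons.mp hq with hq | hq
      · exact absurd hqe (hq ▸ (ne_of_gt hlt0))
      · have hpw0 : (h0 :: t).Pairwise (fun a b => a.1 ≤ b.1) := h ▸ hpw'
        have : h0.1 ≤ q.1 := (List.pairwise_cons.mp hpw0).1 q hq
        exact absurd hqe (ne_of_gt (lt_of_lt_of_le hlt0 this))

-- characterisation of the run sweep on an ordered pair list
lemma pvRuns_eq_sel : ∀ S : List (String × String), S.Pairwise (fun a b => a.1 ≤ b.1) →
    pvRuns S = pvSel S (pvKeys S) := by
  intro S
  induction S using pvKeys.induct with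
  | case1 => intro _; simp [pvRuns, pvSel]
  | case2 p rest ih =>
    intro hp
    rw [List.pairwise_cons] at hp
    set run := rest.takeWhile (fun q => q.1 == p.1) with hrun
    set rest' := rest.dropWhile (fun q => q.1 == p.1) with hrest'
    have hsplit : rest = run ++ rest' := (List.takeWhile_append_dropWhile).symm
    have hrunkey : ∀ q ∈ run, q.1 = p.1 := by
      intro q hq
      have := List.mem_takeWhile_imp hq
      simpa using this
    have hrest'key : ∀ q ∈ rest', p.1 < q.1 := by
      intro q hq
      cases h : rest' with
      | nil => rw [h] at hq; simp at hq
      | cons h0 t =>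
        have hh0 : ¬ (h0.1 == p.1) = true := by
          have := List.head?_dropWhile_not (fun q => q.1 == p.1) rest
          rw [← hrest', h] at this
          simpa using this
        have hle0 : p.1 ≤ h0.1 := hp.1 h0 (by rw [hsplit, h]; simp)
        have hlt0 : p.1 < h0.1 := lt_of_le_of_ne hle0 (by simpa using fun hh => hh0 (by simp [hh.symm]))
        rw [h] at hq
        rcases List.mem_cons.mp hq with hq | hq
        · exact hq ▸ hlt0
        · have hpw : rest'.Pairwise (fun a b => a.1 ≤ b.1) := hp.2.sublist (List.dropWhile_sublist _)
          have : h0.1 ≤ q.1 := by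
            rw [h] at hpw
            exact (List.pairwise_cons.mp hpw).1 q hq
          exact lt_of_lt_of_le hlt0 this
    have hpw' : rest'.Pairwise (fun a b => a.1 ≤ b.1) :=
      hp.2.sublist (List.dropWhile_sublist _)
    -- counts over S = p :: run ++ rest'
    have hcount_p : (((p :: rest).map (fun q => q.1)).count p.1) = 1 + run.length := by
      rw [hsplit, List.map_cons, List.map_append, List.count_cons_self, List.count_append]
      have h1 : (run.map (fun q => q.1)).count p.1 = run.length := by
        rw [List.count_eq_length.mpr]
        · simp
        · intro b hb
          obtain ⟨q, hq, rfl⟩ := List.mem_map.mp hb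
          exact (hrunkey q hq).symm
      have h2 : (rest'.map (fun q => q.1)).count p.1 = 0 := by
        rw [List.count_eq_zero]
        intro hmem
        obtain ⟨q, hq, hqe⟩ := List.mem_map.mp hmem
        exact (hrest'key q hq).ne' hqe
      omega
    have hfind_p : (p :: rest).find? (fun q => q.1 == p.1) = some p :=
      List.find?_cons_of_pos (by simp)
    -- for keys of rest', counting and finding in S reduces to rest'
    have hred : ∀ k ∈ pvKeys rest',
        (((p :: rest).map (fun q => q.1)).count k = (rest'.map (fun q => q.1)).count k)
        ∧ (p :: rest).find? (fun q => q.1 == k) = rest'.find? (fun q => q.1 == k) := by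
      intro k hk
      have hkmem : k ∈ rest'.map (fun q => q.1) := pvKeys_subset_keys rest' k hk
      obtain ⟨q0, hq0, rfl⟩ := List.mem_map.mp hkmem
      have hkne : p.1 ≠ q0.1 := ne_of_lt (hrest'key q0 hq0)
      have hkrun : ∀ r ∈ run, ¬ (r.1 == q0.1) = true := by
        intro r hr
        simp only [beq_iff_eq]
        rw [hrunkey r hr]
        exact hkne
      constructor
      · rw [hsplit, List.map_cons, List.map_append, List.count_cons_of_ne (by simpa using hkne) , List.count_append]
        have : (run.map (fun q => q.1)).count q0.1 = 0 := by
          rw [List.count_eq_zero]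
          intro hmem
          obtain ⟨r, hr, hre⟩ := List.mem_map.mp hmem
          exact (hkrun r hr) (by simp [hre])
        omega
      · rw [hsplit]
        rw [List.find?_cons_of_neg (by simpa using hkne), List.find?_append,
          List.find?_eq_none.mpr hkrun]
        exact Option.none_or
    -- unfold one step of pvRuns and of pvKeys
    rw [show pvKeys (p :: rest) = p.1 :: pvKeys rest' from by rw [pvKeys]]
    unfold pvSel
    rw [List.filterMap_cons]
    have hselrest : (pvKeys rest').filterMap (fun k =>
        if 1 < ((p :: rest).map (fun q => q.1)).count k
        then ((p :: rest).find? (fun q => q.1 == k)).map (fun q => q.2) else none)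
        = pvSel rest' (pvKeys rest') := by
      unfold pvSel
      apply List.filterMap_congr
      intro k hk
      rw [(hred k hk).1, (hred k hk).2]
    by_cases hlen : 0 < run.length
    · rw [pvRuns]
      rw [if_pos (by rw [← hrun]; exact hlen), ← hrest']
      have : 1 < ((p :: rest).map (fun q => q.1)).count p.1 := by omega
      rw [if_pos this, hfind_p]
      rw [hselrest, ih hpw']
      rfl
    · rw [pvRuns]
      rw [if_neg (by rw [← hrun]; exact hlen), ← hrest']
      have : ¬ 1 < ((p :: rest).map (fun q => q.1)).count p.1 := by omega
      rw [if_neg this]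
      rw [hselrest, ih hpw']

-- ===== VERDICT (by name: the statement is the Claim_ definition above) =====
theorem verifier_doublons_spec : Claim_equal_verifier_doublons := by
  intro q _
  simp only [Spec_verifier_doublons, verifier_doublons, verifier_doublons_alt]
  rw [pvBPairs, pvASplit, List.nil_append,
    PySem.Dict.foldl_insert_getD_add_one_eq_counter]
  have hpwS : (PySem.List.sorted (q.filterMap pvPairOf) (fun p => p.1) false).Pairwise
      (fun a b => a.1 ≤ b.1) := PySem.List.sorted_pairwise _ (fun p : String × String => p.1)
  -- A's comprehension over the counter items is pvSel over the distinct keys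
  have hA : ((PySem.Dict.counter ((q.filterMap pvPairOf).map (fun p => p.1))).items.filterMap
        (fun p => if p.2 > 1
          then some (((q.filterMap pvPairOf).foldl (fun d p => d.setdefault p.1 p.2)
            PySem.Dict.empty).getD p.1 "")
          else none))
      = pvSel (q.filterMap pvPairOf)
          (PySem.Set.ofList ((q.filterMap pvPairOf).map (fun p => p.1))) := by
    rw [PySem.Dict.items_counter, List.filterMap_map]
    unfold pvSel
    apply List.filterMap_congr
    intro k hk
    have hkmem : k ∈ (q.filterMap pvPairOf).map (fun p => p.1) :=
      (PySem.Set.mem_ofList _ k).mp hk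
    obtain ⟨q0, hq0, rfl⟩ := List.mem_map.mp hkmem
    have hfind : ∃ p0, (q.filterMap pvPairOf).find? (fun p => p.1 == q0.1) = some p0 :=
      Option.isSome_iff_exists.mp (List.find?_isSome.mpr ⟨q0, hq0, by simp⟩)
    obtain ⟨p0, hp0⟩ := hfind
    have hget : (((q.filterMap pvPairOf).foldl (fun d p => d.setdefault p.1 p.2)
        PySem.Dict.empty).getD q0.1 "") = p0.2 := by
      have hg := pvSetdfGet (q.filterMap pvPairOf) PySem.Dict.empty q0.1
      rw [hp0] at hg
      simp only [PySem.Dict.getD, hg]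
      simp [PySem.Dict.empty, PySem.Dict.get?]
    simp only [Function.comp]
    by_cases hc : 1 < ((q.filterMap pvPairOf).map (fun p => p.1)).count q0.1
    · have hci : (((q.filterMap pvPairOf).map (fun p => p.1)).count q0.1 : Int) > 1 := by
        exact_mod_cast hc
      simp [hc, hci, hget, hp0]
    · have hci : ¬ (((q.filterMap pvPairOf).map (fun p => p.1)).count q0.1 : Int) > 1 := by
        exact_mod_cast hc
      simp [hc, hci]
  rw [hA]
  -- B's run sweep is pvSel over the keys of the sorted pair list
  rw [pvRuns_eq_sel _ hpwS, pvSel_sorted]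
  -- the two key lists are permutations of each other (both nodup, same membership)
  have hperm : (PySem.Set.ofList ((q.filterMap pvPairOf).map (fun p => p.1))).Perm
      (pvKeys (PySem.List.sorted (q.filterMap pvPairOf) (fun p => p.1) false)) := by
    rw [List.perm_ext_iff_of_nodup (PySem.Set.nodup_ofList _) (pvKeys_nodup _ hpwS)]
    intro k
    rw [PySem.Set.mem_ofList, pvKeys_mem_iff _ hpwS k]
    exact Iff.symm (((PySem.List.sorted_perm (q.filterMap pvPairOf) (fun p => p.1)
      false).map (fun p => p.1)).mem_iff)
  exact PySem.List.sorted_eq_sorted_of_perm _ _ _ (fun a b h => h) (hperm.filterMap _)
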